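-- pv_equiv track=rewrite | github.com/Project-Logos-2026/Logos | LOGOS_SYSTEM/RUNTIME_CORES/RUNTIME_OPPERATIONS_CORE/Dynamic_Reconstruction_Adaptive_Compilation_Protocol/DRAC_Tools/DRAC_Dependancy_Resolver.py | validate_dependency_order
-- ===== SOURCE A (Python) =====
-- from typing import Dict, List
--
-- def validate_dependency_order(
--     phases: List[str],
--     dependencies: Dict[str, List[str]]
-- ) -> bool:
--     seen = set()
--
--     for phase in phases:
--         required = dependencies.get(phase, [])
--         if any(req not in seen for req in required):
--             return False
--         seen.add(phase)
--
--     return True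
-- ===== SOURCE B (Python) =====
-- def validate_dependency_order(phases, dependencies):
--     # Two-pass: first-occurrence index table, then validate each phase's deps
--     # by comparing first-occurrence positions.
--     first = {}
--     for i, p in enumerate(phases):
--         if p not in first:
--             first[p] = i
--     for i, p in enumerate(phases):
--         for dep in dependencies.get(p, []):
--             j = first.get(dep)
--             if j is None or j >= i:
--                 return False
--     return True
-- ===== Notes on version B (the rewrite author's own statement) =====
-- stated objective: alternative
-- what changed: Replaces the incremental seen-set single pass with a two-pass table-then-validate shape: first build a dict mapping each phase to its first-occurrence index, then check every dependency's first occurrence strictly precedes the phase's index.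
import Mathlib
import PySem

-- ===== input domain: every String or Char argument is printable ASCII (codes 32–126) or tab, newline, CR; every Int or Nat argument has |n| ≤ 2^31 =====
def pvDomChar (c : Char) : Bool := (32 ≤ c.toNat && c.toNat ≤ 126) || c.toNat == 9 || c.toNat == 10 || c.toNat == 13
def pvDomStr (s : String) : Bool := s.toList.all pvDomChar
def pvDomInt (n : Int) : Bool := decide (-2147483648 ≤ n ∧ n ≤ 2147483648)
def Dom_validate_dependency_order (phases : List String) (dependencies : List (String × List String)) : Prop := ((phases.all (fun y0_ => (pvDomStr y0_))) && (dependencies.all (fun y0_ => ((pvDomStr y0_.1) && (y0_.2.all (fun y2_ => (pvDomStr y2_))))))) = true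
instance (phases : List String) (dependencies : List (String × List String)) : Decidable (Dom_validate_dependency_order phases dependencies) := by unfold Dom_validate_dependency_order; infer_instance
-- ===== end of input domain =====

-- B checks first-occurrence indices instead of A's incremental seen set.

-- ===== PORT A =====
-- dependencies.get(phase, []): first-match lookup in the association list
def vdoReq (dependencies : List (String × List String)) (p : String) : List String :=
  ((dependencies.find? (fun kv => kv.1 == p)).map (·.2)).getD []

-- the 'for phase in phases' loop, carrying the 'seen' set
def vdoLoopA (dependencies : List (String × List String)) (seen : PySem.Set String) :
    List String → Bool
  | [] => true
  | p :: rest =>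
    let required := vdoReq dependencies p
    if required.any (fun req => !(PySem.Set.contains seen req)) then false
    else vdoLoopA dependencies (PySem.Set.add seen p) rest

def validate_dependency_order (phases : List String) (dependencies : List (String × List String)) : Bool :=
  vdoLoopA dependencies PySem.Set.empty phases

-- ===== PORT B =====
-- first pass: dict mapping each phase to its FIRST-occurrence index
def vdoFirst (phases : List String) : PySem.Dict String Int :=
  (PySem.List.enumerate phases).foldl
    (fun d ip => if d.contains ip.2 then d else d.insert ip.2 ip.1)
    PySem.Dict.empty

def validate_dependency_order_alt (phases : List String) (dependencies : List (String × List String)) : Bool :=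
  let first := vdoFirst phases
  -- second pass: every dependency's first occurrence must be strictly earlier
  (PySem.List.enumerate phases).all (fun ip =>
    (vdoReq dependencies ip.2).all (fun dep =>
      match first.get? dep with
      | some j => decide (j < ip.1)
      | none => false))

-- ===== PRECONDITION & SPEC =====
def Spec_validate_dependency_order (phases : List String) (dependencies : List (String × List String)) (out : Bool) : Prop := out = validate_dependency_order_alt phases dependencies
instance (phases : List String) (dependencies : List (String × List String)) (out : Bool) : Decidable (Spec_validate_dependency_order phases dependencies out) := by unfold Spec_validate_dependency_order; infer_instance

-- ===== CLAIM (what is proved, stated in full; the proofs are below) =====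
def Claim_equal_validate_dependency_order : Prop := ∀ (phases : List String) (dependencies : List (String × List String)), Dom_validate_dependency_order phases dependencies → Spec_validate_dependency_order phases dependencies (validate_dependency_order phases dependencies)

-- ===== LEMMAS AND PROOFS =====

-- the fold building vdoFirst, characterised over any start index and initial dict
theorem vdoFirst_fold (l : List String) (s : Int) (d : PySem.Dict String Int) (k : String) :
    ((PySem.List.enumerate l s).foldl
      (fun d ip => if d.contains ip.2 then d else d.insert ip.2 ip.1) d).get? k
    = if d.contains k then d.get? k
      else (PySem.List.index? l k).map (fun n : Nat => s + (n : Int)) := by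
  induction l generalizing s d with
  | nil =>
    by_cases hc : d.contains k = true
    · simp [PySem.List.enumerate_nil, PySem.List.index?, hc]
    · simp only [Bool.not_eq_true] at hc
      simp [PySem.List.enumerate_nil, hc,
        PySem.Dict.get?_eq_none_iff_contains]
  | cons p rest ih =>
    rw [PySem.List.enumerate_cons, List.foldl_cons]
    by_cases hpk : p = k
    · subst hpk
      by_cases hc : d.contains p = true
      · rw [if_pos hc, ih, if_pos hc, if_pos hc]
      · rw [if_neg hc, ih, PySem.List.index?_cons_self]
        simp only [Bool.not_eq_true] at hc
        rw [if_pos (by rw [PySem.Dict.contains_insert]; simp),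
            PySem.Dict.get?_insert_self, if_neg (by simp [hc])]
        simp
    · have hi : PySem.List.index? (p :: rest) k = (PySem.List.index? rest k).map (· + 1) :=
        PySem.List.index?_cons_of_ne rest hpk
      have hmap : ∀ (o : Option Nat),
          (o.map (· + 1)).map (fun n : Nat => s + (n : Int)) = o.map (fun n : Nat => (s + 1) + (n : Int)) := by
        intro o; cases o with
        | none => rfl
        | some m => simp; ring
      by_cases hc : d.contains p = true
      · rw [if_pos hc, ih, hi, hmap]
      · rw [if_neg hc, ih, hi, hmap]
        have hck' : (d.insert p s).contains k = d.contains k := by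
          rw [PySem.Dict.contains_insert]
          have : (k == p) = false := by
            rw [beq_eq_false_iff_ne]
            exact fun h => hpk h.symm
          rw [this, Bool.false_or]
        rw [hck']
        by_cases hck : d.contains k = true
        · rw [if_pos hck, if_pos hck]
          exact PySem.Dict.get?_insert_of_ne _ _ (fun h : k = p => hpk h.symm)
        · rw [if_neg hck, if_neg hck]

theorem mem_take_iff_index? (l : List String) (k : String) (n : Nat) :
    k ∈ l.take n ↔ ∃ m, PySem.List.index? l k = some m ∧ m < n := by
  induction l generalizing n with
  | nil => simp
  | cons p rest ih =>
    cases n with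
    | zero => simp
    | succ n =>
      rw [List.take_succ_cons]
      by_cases hpk : p = k
      · subst hpk
        rw [PySem.List.index?_cons_self]
        simp
      · rw [PySem.List.index?_cons_of_ne rest hpk]
        simp only [List.mem_cons, ih]
        constructor
        · rintro (h | ⟨m, hm, hlt⟩)
          · exact absurd h.symm hpk
          · exact ⟨m + 1, by rw [hm]; rfl, by omega⟩
        · rintro ⟨m, hm, hlt⟩
          rcases h2 : PySem.List.index? rest k with _ | m' <;> rw [h2] at hm
          · exact absurd hm (by simp)
          · simp only [Option.map_some, Option.some.injEq] at hm
            exact Or.inr ⟨m', rfl, by omega⟩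

-- key: the first-occurrence check at index n is membership in the prefix
theorem vdoFirst_check (full : List String) (dep : String) (n : Nat) :
    (match (vdoFirst full).get? dep with
     | some j => decide (j < (n : Int))
     | none => false) = decide (dep ∈ full.take n) := by
  rw [vdoFirst, vdoFirst_fold full 0 PySem.Dict.empty dep]
  rw [if_neg (by simp)]
  rcases h : PySem.List.index? full dep with _ | m
  · have hnm : ¬ dep ∈ full.take n := by
      rw [mem_take_iff_index? full dep n]
      rintro ⟨m, hm, -⟩
      rw [h] at hm
      simp at hm
    simp [hnm]
  · have : dep ∈ full.take n ↔ m < n := by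
      rw [mem_take_iff_index? full dep n]
      constructor
      · rintro ⟨m', hm', hlt⟩
        rw [h] at hm'
        injection hm' with e
        omega
      · intro hlt; exact ⟨m, h, hlt⟩
    simp [this]

-- Set.add on an ofList set is ofList of the appended list
theorem ofList_append_singleton (pre : List String) (p : String) :
    PySem.Set.ofList (pre ++ [p]) = PySem.Set.add (PySem.Set.ofList pre) p := by
  rw [PySem.Set.ofList_eq_foldl, PySem.Set.ofList_eq_foldl, List.foldl_append]
  rfl

-- main loop invariant: A's loop over the suffix equals B's indexed check there
theorem vdoLoop_eq (dependencies : List (String × List String)) (full : List String) :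
    ∀ (suf pre : List String), pre ++ suf = full →
    vdoLoopA dependencies (PySem.Set.ofList pre) suf
    = (PySem.List.enumerate suf (pre.length : Int)).all (fun ip =>
        (vdoReq dependencies ip.2).all (fun dep =>
          match (vdoFirst full).get? dep with
          | some j => decide (j < ip.1)
          | none => false)) := by
  intro suf
  induction suf with
  | nil => intro pre h; simp [vdoLoopA, PySem.List.enumerate_nil]
  | cons p rest ih =>
    intro pre h
    rw [PySem.List.enumerate_cons, List.all_cons, vdoLoopA]
    have htake : full.take pre.length = pre := by
      rw [← h]; simp
    have hchk : ∀ dep, (match (vdoFirst full).get? dep with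
        | some j => decide (j < (pre.length : Int))
        | none => false) = decide (dep ∈ pre) := by
      intro dep; rw [vdoFirst_check full dep pre.length, htake]
    have hcontains : ∀ dep, PySem.Set.contains (PySem.Set.ofList pre) dep = decide (dep ∈ pre) := by
      intro dep
      simp [PySem.Set.mem_ofList]
    by_cases hany : (vdoReq dependencies p).any (fun req => !(PySem.Set.contains (PySem.Set.ofList pre) req)) = true
    · simp only [hany, if_true]
      have : ((vdoReq dependencies p).all (fun dep =>
          match (vdoFirst full).get? dep with
          | some j => decide (j < (pre.length : Int))
          | none => false)) = false := by
        simp only [hchk]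
        rcases List.any_eq_true.mp hany with ⟨req, hmem, hreq⟩
        refine List.all_eq_false.mpr ⟨req, hmem, ?_⟩
        rw [hcontains req] at hreq
        simp at hreq
        simp [hreq]
      rw [this]; simp
    · simp only [hany]
      have hall : ((vdoReq dependencies p).all (fun dep =>
          match (vdoFirst full).get? dep with
          | some j => decide (j < (pre.length : Int))
          | none => false)) = true := by
        simp only [hchk]
        refine List.all_eq_true.mpr ?_
        intro req hmem
        by_contra hne
        refine hany (List.any_eq_true.mpr ⟨req, hmem, ?_⟩)
        rw [hcontains req]
        simpa using hne
      rw [hall, Bool.true_and]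
      rw [← ofList_append_singleton]
      have := ih (pre ++ [p]) (by simpa using h)
      simpa using this

-- ===== VERDICT (by name: the statement is the Claim_ definition above) =====
theorem validate_dependency_order_spec : Claim_equal_validate_dependency_order := by
  intro phases dependencies _
  unfold Spec_validate_dependency_order validate_dependency_order validate_dependency_order_alt
  have := vdoLoop_eq dependencies phases phases [] rfl
  simpa [PySem.Set.empty] using this
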